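-- pv_equiv track=rewrite | github.com/adelelawady/Syncify | syncify/spotify/Spotify_likes_info.py | _is_likes_url
-- ===== SOURCE A (Python) =====
-- LIKES_HOST = "open.spotify.com"
--
-- LIKES_PATH = "/collection/tracks"
--
-- def _is_likes_url(url: str) -> bool:
--     try:
--         bare = url.lower()
--         for scheme in ("https://", "http://"):
--             if bare.startswith(scheme):
--                 bare = bare[len(scheme):]
--                 break
--         bare = bare.split("#")[0].split("?")[0].rstrip("/")
--         host, _, path = bare.partition("/")
--         return host == LIKES_HOST and ("/" + path) == LIKES_PATH
--     except Exception:
--         return False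
-- ===== SOURCE B (Python) =====
-- LIKES_HOST = "open.spotify.com"
--
-- LIKES_PATH = "/collection/tracks"
--
-- _PREFIXES = (
--     "https://" + LIKES_HOST + LIKES_PATH,
--     "http://" + LIKES_HOST + LIKES_PATH,
--     LIKES_HOST + LIKES_PATH,
-- )
--
-- def _is_likes_url(url: str) -> bool:
--     try:
--         s = url.lower()
--         for prefix in _PREFIXES:
--             if s.startswith(prefix):
--                 tail = s[len(prefix):].lstrip("/")
--                 return not tail or tail[0] in "?#"
--         return False
--     except Exception:
--         return False
-- ===== Notes on version B (the rewrite author's own statement) =====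
-- stated objective: simpler
-- what changed: Replaces A's imperative pipeline (strip one scheme, cut query and fragment, strip trailing slashes, partition into host and path and compare the pieces) with a single loop that matches the URL against the three full likes-URL prefixes and then checks that the remainder is slashes followed by an optional query/fragment tail.
import Mathlib
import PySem

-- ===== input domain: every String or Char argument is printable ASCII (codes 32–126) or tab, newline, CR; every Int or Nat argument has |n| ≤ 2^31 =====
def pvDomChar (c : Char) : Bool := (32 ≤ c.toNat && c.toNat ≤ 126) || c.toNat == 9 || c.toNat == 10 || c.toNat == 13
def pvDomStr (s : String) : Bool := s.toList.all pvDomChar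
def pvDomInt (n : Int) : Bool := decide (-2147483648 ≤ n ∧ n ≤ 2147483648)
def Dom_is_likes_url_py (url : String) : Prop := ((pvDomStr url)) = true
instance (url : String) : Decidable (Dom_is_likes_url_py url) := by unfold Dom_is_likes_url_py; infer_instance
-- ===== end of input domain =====

-- B replaces A's imperative scheme-strip/split/rstrip/partition pipeline with a single
-- prefix match against the three full likes-URL prefixes plus a check that the remainder
-- is slashes followed by an optional query/fragment tail (objective: simpler).

-- ===== PORT A =====
def pvLikesHost : List Char := "open.spotify.com".toList      -- module constant LIKES_HOST

def pvLikesPath : List Char := "/collection/tracks".toList    -- module constant LIKES_PATH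

-- exact hand port of str.rstrip("/") for a single-character strip set
def pvRstripSlash (cs : List Char) : List Char :=
  (cs.reverse.dropWhile (· == '/')).reverse

-- exact hand port of str.partition("/"): split at the first '/', or (s, "", "") when '/' is absent
def pvPartitionSlash (cs : List Char) : List Char × List Char × List Char :=
  match cs.span (· != '/') with
  | (b, []) => (b, [], [])
  | (b, s :: r) => (b, [s], r)

def is_likes_url_py (url : String) : Bool :=
  let bare := PySem.Chars.lower url.toList                    -- bare = url.lower()
  -- for scheme in ("https://", "http://"): if bare.startswith(scheme): bare = bare[len(scheme):]; break
  let bare := if PySem.Chars.startswith bare "https://".toList then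
                PySem.Chars.slice bare (some 8) none
              else if PySem.Chars.startswith bare "http://".toList then
                PySem.Chars.slice bare (some 7) none
              else bare
  let bare := (PySem.Chars.splitOn bare ['#']).headD bare     -- bare.split("#")[0] (split never returns [])
  let bare := (PySem.Chars.splitOn bare ['?']).headD bare     -- .split("?")[0]
  let bare := pvRstripSlash bare                              -- .rstrip("/")
  match pvPartitionSlash bare with                            -- host, _, path = bare.partition("/")
  | (host, _, path) => host == pvLikesHost && ('/' :: path) == pvLikesPath

-- ===== PORT B =====
-- exact hand port of str.lstrip("/") for a single-character strip set
def pvLstripSlash (cs : List Char) : List Char :=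
  cs.dropWhile (· == '/')

-- `return not tail or tail[0] in "?#"`
def pvTailOk (t : List Char) : Bool :=
  match t with
  | [] => true
  | c :: _ => c == '?' || c == '#'

-- the `for prefix in _PREFIXES:` loop of Source B
def pvBLoop (s : List Char) : List (List Char) → Bool
  | [] => false
  | pre :: rest =>
      if PySem.Chars.startswith s pre then
        pvTailOk (pvLstripSlash (s.drop pre.length))          -- tail = s[len(prefix):].lstrip("/")
      else pvBLoop s rest

def is_likes_url_py_alt (url : String) : Bool :=
  pvBLoop (PySem.Chars.lower url.toList)
    ["https://open.spotify.com/collection/tracks".toList,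
     "http://open.spotify.com/collection/tracks".toList,
     "open.spotify.com/collection/tracks".toList]

-- ===== PRECONDITION & SPEC =====
def Spec_is_likes_url_py (url : String) (out : Bool) : Prop := out = is_likes_url_py_alt url
instance (url : String) (out : Bool) : Decidable (Spec_is_likes_url_py url out) := by unfold Spec_is_likes_url_py; infer_instance

-- ===== CLAIM (what is proved, stated in full; the proofs are below) =====
def Claim_equal_is_likes_url_py : Prop := ∀ (url : String), Dom_is_likes_url_py url → Spec_is_likes_url_py url (is_likes_url_py url)

-- ===== LEMMAS AND PROOFS =====

-- the full target "open.spotify.com/collection/tracks"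
def pvT : List Char := pvLikesHost ++ pvLikesPath

-- accumulator lemma for PySem.Chars.splitOn.go
lemma pv_go_acc (sep : List Char) (fuel : Nat) (l cur : List Char) (acc : List (List Char)) :
    PySem.Chars.splitOn.go sep fuel l cur acc
      = acc.reverse ++ PySem.Chars.splitOn.go sep fuel l cur [] := by
  induction fuel generalizing l cur acc with
  | zero => simp [PySem.Chars.splitOn.go]
  | succ n ih =>
    cases l with
    | nil => simp [PySem.Chars.splitOn.go]
    | cons c rest =>
      simp only [PySem.Chars.splitOn.go]
      split
      · rw [ih _ _ (cur.reverse :: acc), ih _ _ [cur.reverse]]; simp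
      · exact ih _ _ _

lemma pv_go_head (c : Char) (fuel : Nat) (l cur : List Char) (h : l.length ≤ fuel) :
    ∃ r, PySem.Chars.splitOn.go [c] fuel l cur []
      = (cur.reverse ++ l.takeWhile (· != c)) :: r := by
  induction fuel generalizing l cur with
  | zero =>
    have : l = [] := List.length_eq_zero_iff.mp (Nat.le_zero.mp h)
    subst this
    exact ⟨[], by simp [PySem.Chars.splitOn.go]⟩
  | succ n ih =>
    cases l with
    | nil => exact ⟨[], by simp [PySem.Chars.splitOn.go]⟩
    | cons c' rest =>
      simp only [PySem.Chars.splitOn.go]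
      by_cases hp : [c].isPrefixOf (c' :: rest) = true
      · have hc : c = c' := by simpa [List.isPrefixOf] using hp
        rw [if_pos hp, pv_go_acc]
        refine ⟨PySem.Chars.splitOn.go [c] n (List.drop [c].length (c' :: rest)) [] [], ?_⟩
        simp [← hc]
      · rw [if_neg hp]
        have hc : (c' != c) = true := by
          simp [List.isPrefixOf] at hp
          simpa [bne_iff_ne] using fun h' => hp (by rw [h'])
        obtain ⟨r, hr⟩ := ih rest (c' :: cur) (by simpa using Nat.le_of_succ_le_succ h)
        refine ⟨r, ?_⟩
        rw [hr]
        simp [hc]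

lemma pv_splitOn_headD (l : List Char) (c : Char) (d : List Char) :
    (PySem.Chars.splitOn l [c]).headD d = l.takeWhile (· != c) := by
  unfold PySem.Chars.splitOn
  obtain ⟨r, hr⟩ := pv_go_head c (l.length + 1) l [] (by omega)
  rw [hr]; simp

-- rstrip("/") ignores trailing slashes
lemma pv_rstrip_append_replicate (x : List Char) (k : Nat) :
    pvRstripSlash (x ++ List.replicate k '/') = pvRstripSlash x := by
  unfold pvRstripSlash
  rw [List.reverse_append, List.reverse_replicate, List.dropWhile_append]
  simp

-- rstrip("/") characterisation: result T (T not ending in '/')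
lemma pv_rstrip_eq_T_iff (u : List Char) :
    pvRstripSlash u = pvT ↔ ∃ k, u = pvT ++ List.replicate k '/' := by
  constructor
  · intro h
    refine ⟨(u.reverse.takeWhile (· == '/')).length, ?_⟩
    have hu : pvRstripSlash u ++ (u.reverse.takeWhile (· == '/')).reverse = u := by
      unfold pvRstripSlash
      rw [← List.reverse_append, List.takeWhile_append_dropWhile, List.reverse_reverse]
    have hrep : (u.reverse.takeWhile (· == '/')).reverse
        = List.replicate (u.reverse.takeWhile (· == '/')).length '/' := by
      rw [← List.reverse_replicate]
      congr 1
      apply List.eq_replicate_length.mpr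
      intro b hb
      have := List.mem_takeWhile_imp hb
      simpa using this
    conv_lhs => rw [← hu]
    rw [h, hrep]
  · rintro ⟨k, rfl⟩
    rw [pv_rstrip_append_replicate]
    decide

-- the partition-based final test of A is exactly equality with T
lemma pv_partition_test (u : List Char) :
    (match pvPartitionSlash u with
     | (host, _, path) => host == pvLikesHost && ('/' :: path) == pvLikesPath)
      = decide (u = pvT) := by
  unfold pvPartitionSlash
  rw [List.span_eq_takeWhile_dropWhile]
  cases hd : u.dropWhile (· != '/') with
  | nil =>
    have hne : u ≠ pvT := by
      intro h; subst h; exact absurd hd (by decide)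
    simp only [hne, decide_false]
    simp
    intro _
    decide
  | cons s r =>
    have hs : s = '/' := by
      have := List.head?_dropWhile_not (· != '/') u
      rw [hd] at this
      simpa using this
    subst hs
    have hu : u = u.takeWhile (· != '/') ++ '/' :: r := by
      conv_lhs => rw [← List.takeWhile_append_dropWhile (p := (· != '/')) (l := u)]
      rw [hd]
    by_cases h1 : u.takeWhile (· != '/') = pvLikesHost
    · by_cases h2 : ('/' :: r) = pvLikesPath
      · have hT : u = pvT := by rw [hu, h1, h2]; rfl
        simp [h2, hT]
        decide
      · have : u ≠ pvT := by
          intro h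
          apply h2
          have hdT : pvT.dropWhile (· != '/') = pvLikesPath := by decide
          rw [← hdT, ← h, hd]
        simp [h1, h2, this]
    · have : u ≠ pvT := by
        intro h
        apply h1
        rw [h]; decide
      simp [h1, this]

-- the "good" shape: target, then slashes, then an empty-or-?/# tail
def pvGood (r : List Char) : Prop :=
  ∃ k t, r = pvT ++ List.replicate k '/' ++ t ∧ pvTailOk t = true

-- A's post-scheme chain
def pvAChain (r : List Char) : Bool :=
  let b1 := (PySem.Chars.splitOn r ['#']).headD r
  let b2 := (PySem.Chars.splitOn b1 ['?']).headD b1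
  match pvPartitionSlash (pvRstripSlash b2) with
  | (host, _, path) => host == pvLikesHost && ('/' :: path) == pvLikesPath

-- B's post-scheme core
def pvBCore (r : List Char) : Bool :=
  if PySem.Chars.startswith r pvT then pvTailOk (pvLstripSlash (r.drop pvT.length)) else false

def pvHostPathTest (u : List Char) : Bool :=
  match pvPartitionSlash u with
  | (host, _, path) => host == pvLikesHost && ('/' :: path) == pvLikesPath

lemma pv_takeWhile_takeWhile (l : List Char) :
    (l.takeWhile (· != '#')).takeWhile (· != '?')
      = l.takeWhile (fun c => c != '#' && c != '?') := by
  induction l with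
  | nil => rfl
  | cons c t ih =>
    cases hc1 : (c != '#') <;> cases hc2 : (c != '?') <;>
      simp [hc1, hc2, ih]

lemma pv_aChain_iff (r : List Char) : pvAChain r = true ↔ pvGood r := by
  have hA : pvAChain r
      = pvHostPathTest (pvRstripSlash (r.takeWhile (fun c => c != '#' && c != '?'))) := by
    simp only [pvAChain]
    rw [pv_splitOn_headD, pv_splitOn_headD, pv_takeWhile_takeWhile]
    rfl
  rw [hA, pvHostPathTest, pv_partition_test, decide_eq_true_iff, pv_rstrip_eq_T_iff]
  constructor
  · rintro ⟨k, hk⟩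
    refine ⟨k, r.dropWhile (fun c => c != '#' && c != '?'), ?_, ?_⟩
    · conv_lhs => rw [← List.takeWhile_append_dropWhile (p := fun c => c != '#' && c != '?') (l := r)]
      rw [hk, List.append_assoc]
    · cases hv : r.dropWhile (fun c => c != '#' && c != '?') with
      | nil => rfl
      | cons x xs =>
        have hx := List.head?_dropWhile_not (fun c => c != '#' && c != '?') r
        rw [hv] at hx
        simp only [List.head?_cons] at hx
        have : x = '#' ∨ x = '?' := by
          by_contra hcon
          simp only [not_or] at hcon
          simp [bne_iff_ne, hcon.1, hcon.2] at hx
        unfold pvTailOk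
        rcases this with h | h <;> simp [h]
  · rintro ⟨k, t, rfl, ht⟩
    refine ⟨k, ?_⟩
    rw [List.append_assoc, List.takeWhile_append]
    rw [if_pos (by rw [(by decide : List.takeWhile (fun c => c != '#' && c != '?') pvT = pvT)])]
    rw [List.takeWhile_append]
    rw [if_pos (by rw [List.takeWhile_replicate]; simp)]
    have htw : List.takeWhile (fun c => c != '#' && c != '?') t = [] := by
      cases t with
      | nil => rfl
      | cons c cs =>
        have : (c == '?' || c == '#') = true := ht
        have hc : (fun c => c != '#' && c != '?') c = false := by
          rcases Bool.or_eq_true_iff.mp this with h | h <;>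
            simp [eq_of_beq h]
        simp [hc]
    rw [htw, List.append_nil]

lemma pv_bCore_iff (r : List Char) : pvBCore r = true ↔ pvGood r := by
  unfold pvBCore
  cases hsw : PySem.Chars.startswith r pvT with
  | false =>
    simp only [Bool.false_eq_true, if_false]
    constructor
    · intro h; exact absurd h (by simp)
    · rintro ⟨k, t, he, -⟩
      have : pvT <+: r := ⟨List.replicate k '/' ++ t, by rw [← List.append_assoc, ← he]⟩
      rw [← PySem.Chars.startswith_iff] at this
      rw [hsw] at this
      exact absurd this (by simp)
  | true =>
    simp only [if_true]
    obtain ⟨t0, ht0⟩ := (PySem.Chars.startswith_iff r pvT).mp hsw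
    have hdrop : r.drop pvT.length = t0 := by rw [← ht0, List.drop_left]
    rw [hdrop]
    unfold pvLstripSlash
    constructor
    · intro hok
      refine ⟨(t0.takeWhile (· == '/')).length, t0.dropWhile (· == '/'), ?_, hok⟩
      have hrep : t0.takeWhile (· == '/')
          = List.replicate (t0.takeWhile (· == '/')).length '/' := by
        apply List.eq_replicate_length.mpr
        intro b hb
        have hb' := List.mem_takeWhile_imp hb
        simpa using hb'
      rw [← ht0, List.append_assoc]
      congr 1
      conv_lhs => rw [← List.takeWhile_append_dropWhile (p := (· == '/')) (l := t0)]
      rw [← hrep]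
    · rintro ⟨k, t, he, ht⟩
      have ht0' : t0 = List.replicate k '/' ++ t := by
        apply List.append_cancel_left (as := pvT)
        rw [ht0, he, List.append_assoc]
      rw [ht0', List.dropWhile_append]
      rw [(by simp : (List.replicate k '/').dropWhile (· == '/') = [])]
      simp only [List.isEmpty_nil, if_true]
      cases t with
      | nil => exact ht
      | cons c cs =>
        have hcb : (c == '?' || c == '#') = true := ht
        have hc : (c == '/') = false := by
          rcases Bool.or_eq_true_iff.mp hcb with h | h <;> simp [eq_of_beq h]
        rw [List.dropWhile_cons, hc]
        · exact ht

-- shift a known scheme prefix out of B's startswith-and-tail check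
lemma pv_core_shift (S t : List Char) :
    (if PySem.Chars.startswith (S ++ t) (S ++ pvT) then
       pvTailOk (pvLstripSlash ((S ++ t).drop (S ++ pvT).length))
     else false) = pvBCore t := by
  unfold pvBCore
  have h1 : PySem.Chars.startswith (S ++ t) (S ++ pvT) = PySem.Chars.startswith t pvT := by
    rw [Bool.eq_iff_iff, PySem.Chars.startswith_iff, PySem.Chars.startswith_iff]
    exact List.prefix_append_right_inj S
  have hlen : (S ++ t).drop (S ++ pvT).length = t.drop pvT.length := by
    rw [List.length_append, List.drop_append, List.drop_eq_nil_of_le (by omega),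
      Nat.add_sub_cancel_left, List.nil_append]
  rw [h1, hlen]

-- a prefix too short for the current branch rules out a longer candidate
lemma pv_sw_false_of_prefix (cs S P : List Char) (hS : S <+: cs)
    (hlen : S.length ≤ P.length) (hnp : ¬ S <+: P) :
    PySem.Chars.startswith cs P = false := by
  rw [← Bool.not_eq_true, PySem.Chars.startswith_iff]
  intro hP
  exact hnp (List.prefix_of_prefix_length_le hS hP hlen)

-- no scheme at all rules out candidates that extend a scheme
lemma pv_sw_false_of_not_prefix (cs S P : List Char)
    (h : PySem.Chars.startswith cs S = false) (hSP : S <+: P) :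
    PySem.Chars.startswith cs P = false := by
  rw [← Bool.not_eq_true, PySem.Chars.startswith_iff]
  intro hP
  have : S <+: cs := hSP.trans hP
  rw [← PySem.Chars.startswith_iff, h] at this
  exact absurd this (by simp)

lemma pv_core_eq (r : List Char) : pvAChain r = pvBCore r := by
  rw [Bool.eq_iff_iff, pv_aChain_iff, pv_bCore_iff]

set_option maxHeartbeats 1000000 in
lemma pv_main (cs : List Char) :
    (let bare := if PySem.Chars.startswith cs "https://".toList then
                   PySem.Chars.slice cs (some 8) none
                 else if PySem.Chars.startswith cs "http://".toList then
                   PySem.Chars.slice cs (some 7) none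
                 else cs
     let b1 := (PySem.Chars.splitOn bare ['#']).headD bare
     let b2 := (PySem.Chars.splitOn b1 ['?']).headD b1
     match pvPartitionSlash (pvRstripSlash b2) with
     | (host, _, path) => host == pvLikesHost && ('/' :: path) == pvLikesPath)
      = pvBLoop cs
          ["https://open.spotify.com/collection/tracks".toList,
           "http://open.spotify.com/collection/tracks".toList,
           "open.spotify.com/collection/tracks".toList] := by
  show pvAChain (if PySem.Chars.startswith cs "https://".toList then
                   PySem.Chars.slice cs (some 8) none
                 else if PySem.Chars.startswith cs "http://".toList then
                   PySem.Chars.slice cs (some 7) none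
                 else cs)
      = pvBLoop cs
          ["https://open.spotify.com/collection/tracks".toList,
           "http://open.spotify.com/collection/tracks".toList,
           "open.spotify.com/collection/tracks".toList]
  by_cases h1 : PySem.Chars.startswith cs "https://".toList = true
  · -- bare starts with "https://"
    rw [if_pos h1]
    obtain ⟨t, ht⟩ := (PySem.Chars.startswith_iff _ _).mp h1
    have hd : PySem.Chars.slice cs (some 8) none = t := by
      rw [PySem.Chars.slice_eq_listSlice, PySem.List.slice_from _ (by norm_num), ← ht]
      rw [(by decide : ((8 : Int).toNat) = ("https://".toList).length), List.drop_left]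
    have hs2 := pv_sw_false_of_prefix cs "https://".toList
      "http://open.spotify.com/collection/tracks".toList ⟨t, ht⟩ (by decide) (by decide)
    have hs3 := pv_sw_false_of_prefix cs "https://".toList
      "open.spotify.com/collection/tracks".toList ⟨t, ht⟩ (by decide) (by decide)
    simp only [pvBLoop, hs2, hs3, Bool.false_eq_true, if_false]
    rw [hd, ← ht, (by decide : "https://open.spotify.com/collection/tracks".toList
        = "https://".toList ++ pvT)]
    rw [pv_core_shift, pv_core_eq]
  · by_cases h2 : PySem.Chars.startswith cs "http://".toList = true
    · -- bare starts with "http://"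
      rw [if_neg h1, if_pos h2]
      obtain ⟨t, ht⟩ := (PySem.Chars.startswith_iff _ _).mp h2
      have hd : PySem.Chars.slice cs (some 7) none = t := by
        rw [PySem.Chars.slice_eq_listSlice, PySem.List.slice_from _ (by norm_num), ← ht]
        rw [(by decide : ((7 : Int).toNat) = ("http://".toList).length), List.drop_left]
      have hs1 := pv_sw_false_of_not_prefix cs "https://".toList
        "https://open.spotify.com/collection/tracks".toList (by simpa using h1) (by decide)
      have hs3 := pv_sw_false_of_prefix cs "http://".toList
        "open.spotify.com/collection/tracks".toList ⟨t, ht⟩ (by decide) (by decide)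
      simp only [pvBLoop, hs1, hs3, Bool.false_eq_true, if_false]
      rw [hd, ← ht, (by decide : "http://open.spotify.com/collection/tracks".toList
          = "http://".toList ++ pvT)]
      rw [pv_core_shift, pv_core_eq]
    · -- no scheme stripped
      rw [if_neg h1, if_neg h2]
      have hs1 := pv_sw_false_of_not_prefix cs "https://".toList
        "https://open.spotify.com/collection/tracks".toList (by simpa using h1) (by decide)
      have hs2 := pv_sw_false_of_not_prefix cs "http://".toList
        "http://open.spotify.com/collection/tracks".toList (by simpa using h2) (by decide)
      simp only [pvBLoop, hs1, hs2, Bool.false_eq_true, if_false]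
      rw [(by decide : "open.spotify.com/collection/tracks".toList = ([] : List Char) ++ pvT)]
      conv_lhs => rw [(by rw [List.nil_append] : cs = ([] : List Char) ++ cs)]
      conv_rhs => rw [(by rw [List.nil_append] : cs = ([] : List Char) ++ cs)]
      rw [pv_core_shift, pv_core_eq, List.nil_append]

-- ===== VERDICT (by name: the statement is the Claim_ definition above) =====
theorem is_likes_url_py_spec : Claim_equal_is_likes_url_py := by
  intro url _
  unfold Spec_is_likes_url_py is_likes_url_py is_likes_url_py_alt
  exact pv_main (PySem.Chars.lower url.toList)
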